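-- pv_equiv track=rewrite | github.com/suharvest/jetson-local-voice | app/tests/test_asr_stream_protocol.py | replace_display
-- ===== SOURCE A (Python) =====
-- def replace_display(msgs):
--     """Simulate client-side replace semantics.
--
--     Returns the final displayed text after processing all messages:
--     - type == "reset": clear display
--     - type == "partial" or not final: update display (replace)
--     - type == "final": freeze display
--     """
--     display = ""
--     final_text = ""
--     for msg in msgs:
--         t = msg.get("text", "")
--         msg_type = msg.get("type")
--         if msg_type == "reset":
--             display = ""
--         elif msg_type == "final":
--             display = t
--             final_text = t
--         else:
--             # partial — replace display
--             display = t
--     return final_text or display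
-- ===== SOURCE B (Python) =====
-- def replace_display(msgs):
--     """Backward scan with early exit: the last 'final' text wins if nonempty;
--     otherwise the display is derived from the very last message."""
--     msgs = list(msgs)
--     for msg in reversed(msgs):
--         if msg.get("type") == "final":
--             ft = msg.get("text", "")
--             if ft:
--                 return ft
--             break
--     if not msgs or msgs[-1].get("type") == "reset":
--         return ""
--     return msgs[-1].get("text", "")
-- ===== Notes on version B (the rewrite author's own statement) =====
-- stated objective: alternative
-- what changed: B scans the messages backwards and returns as soon as it finds the last 'final' message with nonempty text, falling back to the last message's text (or '' on reset/empty); A simulates the whole stream forwards with a running display.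
import Mathlib
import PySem

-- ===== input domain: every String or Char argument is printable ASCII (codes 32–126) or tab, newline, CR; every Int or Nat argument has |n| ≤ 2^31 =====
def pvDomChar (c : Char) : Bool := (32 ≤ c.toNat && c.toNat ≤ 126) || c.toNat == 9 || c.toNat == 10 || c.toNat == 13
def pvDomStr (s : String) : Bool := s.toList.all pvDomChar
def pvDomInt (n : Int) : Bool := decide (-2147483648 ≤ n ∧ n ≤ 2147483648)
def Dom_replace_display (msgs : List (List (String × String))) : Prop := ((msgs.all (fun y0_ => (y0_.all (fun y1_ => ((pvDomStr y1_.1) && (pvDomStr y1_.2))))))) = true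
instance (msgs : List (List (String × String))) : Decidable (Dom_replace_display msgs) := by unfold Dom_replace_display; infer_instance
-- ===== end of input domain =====

-- B replaces A's forward simulation with a backward scan that finds the last 'final'
-- message (early exit on nonempty text) and falls back to the last message (alternative traversal; same worst-case cost).

-- ===== PORT A =====
-- one loop step of A: updates (display, final_text)
def rdStepA (s : String × String) (m : List (String × String)) : String × String :=
  let t := (PySem.Dict.mk m).getD "text" ""
  let mt := (PySem.Dict.mk m).get? "type"
  if mt = some "reset" then ("", s.2)
  else if mt = some "final" then (t, t)
  else (t, s.2)

def replace_display (msgs : List (List (String × String))) : String :=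
  let r := msgs.foldl rdStepA ("", "")
  if r.2 = "" then r.1 else r.2    -- `final_text or display`

-- ===== PORT B =====
-- the backward loop: first 'final' message in the reversed list; its text, or none
def rdFindFinal : List (List (String × String)) → Option String
  | [] => none
  | m :: rest =>
    if (PySem.Dict.mk m).get? "type" = some "final" then some ((PySem.Dict.mk m).getD "text" "")
    else rdFindFinal rest

-- the fallback after the loop: `'' if not msgs or reset else msgs[-1].get("text","")`
def rdFallback (msgs : List (List (String × String))) : String :=
  if msgs = [] then ""
  else
    let m := (PySem.List.pyGet? msgs (-1)).getD []
    if (PySem.Dict.mk m).get? "type" = some "reset" then ""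
    else (PySem.Dict.mk m).getD "text" ""

def replace_display_alt (msgs : List (List (String × String))) : String :=
  match rdFindFinal msgs.reverse with
  | some ft => if ft ≠ "" then ft else rdFallback msgs   -- `if ft: return ft` else break to fallback
  | none => rdFallback msgs

-- ===== PRECONDITION & SPEC =====
def Spec_replace_display (msgs : List (List (String × String))) (out : String) : Prop := out = replace_display_alt msgs
instance (msgs : List (List (String × String))) (out : String) : Decidable (Spec_replace_display msgs out) := by unfold Spec_replace_display; infer_instance

-- ===== CLAIM (what is proved, stated in full; the proofs are below) =====
def Claim_equal_replace_display : Prop := ∀ (msgs : List (List (String × String))), Dom_replace_display msgs → Spec_replace_display msgs (replace_display msgs)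

-- ===== LEMMAS AND PROOFS =====

-- proof-side: the display derived from one message
def rdDisp (m : List (String × String)) : String :=
  if (PySem.Dict.mk m).get? "type" = some "reset" then ""
  else (PySem.Dict.mk m).getD "text" ""

-- characterization of A's fold: display = rdDisp of the last message (or the start value),
-- final_text = text of the last 'final' message (or the start value)
theorem rd_foldA_char (msgs : List (List (String × String))) (d f : String) :
    msgs.foldl rdStepA (d, f) =
      ((match msgs.getLast? with | none => d | some m => rdDisp m),
       (match rdFindFinal msgs.reverse with | none => f | some t => t)) := by
  induction msgs using List.reverseRecOn generalizing d f with
  | nil => rfl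
  | append_singleton l m ih =>
    rw [List.foldl_append, ih d f]
    simp only [List.foldl_cons, List.foldl_nil, List.getLast?_append,
      List.reverse_append, List.reverse_cons, List.reverse_nil, List.nil_append,
      List.cons_append, rdFindFinal, rdStepA, rdDisp]
    by_cases hr : (PySem.Dict.mk m).get? "type" = some "reset"
    · simp [hr]
    · by_cases hf : (PySem.Dict.mk m).get? "type" = some "final" <;> simp [hr, hf]

theorem rd_fallback_eq (msgs : List (List (String × String))) :
    rdFallback msgs = (match msgs.getLast? with | none => "" | some m => rdDisp m) := by
  unfold rdFallback
  cases h : msgs.getLast? with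
  | none => simp [List.getLast?_eq_none_iff.mp h]
  | some m =>
    have hne : msgs ≠ [] := by rintro rfl; simp at h
    rw [if_neg hne, PySem.List.pyGet?_neg_one, h]
    rfl

-- ===== VERDICT (by name: the statement is the Claim_ definition above) =====
theorem replace_display_spec : Claim_equal_replace_display := by
  intro msgs _
  show replace_display msgs = replace_display_alt msgs
  unfold replace_display replace_display_alt
  rw [rd_foldA_char msgs "" "", rd_fallback_eq]
  cases hff : rdFindFinal msgs.reverse with
  | none => simp
  | some t =>
    by_cases ht : t = "" <;> simp [ht]
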